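-- pv_equiv track=rewrite | github.com/SockeValley/-Solitaire-keystream | solitaire.py | int_convert
-- ===== SOURCE A (Python) =====
-- def int_convert(message):
--     """ Converts a message to integers"""
--     stream = {'A': 1, 'B': 2, 'C': 3, 'D': 4, 'E': 5, 'F': 6,'G': 7,
--          'H': 8, 'I': 9, 'J': 10, 'K': 11, 'L': 12, 'M': 13, 'N': 14,
--          'O': 15, 'P': 16, 'Q': 17, 'R': 18, 'S': 19, 'T': 20, 'U': 21,
--          'V': 22, 'W': 23, 'X': 24, 'Y': 25, 'Z': 26}
--     nums = []
--     for letter in message: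
--         for k,v in stream.items():
--             if letter == k:
--                 nums.append(v)
--     return nums
-- ===== SOURCE B (Python) =====
-- def int_convert(message):
--     """ Converts a message to integers"""
--     return [ord(letter) - 64 for letter in message if 'A' <= letter <= 'Z']
-- ===== Notes on version B (the rewrite author's own statement) =====
-- stated objective: simpler
-- what changed: Replaces the 26-entry dict and its per-character full table scan with a single comprehension computing ord(letter)-64 under a range test.
import Mathlib
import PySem

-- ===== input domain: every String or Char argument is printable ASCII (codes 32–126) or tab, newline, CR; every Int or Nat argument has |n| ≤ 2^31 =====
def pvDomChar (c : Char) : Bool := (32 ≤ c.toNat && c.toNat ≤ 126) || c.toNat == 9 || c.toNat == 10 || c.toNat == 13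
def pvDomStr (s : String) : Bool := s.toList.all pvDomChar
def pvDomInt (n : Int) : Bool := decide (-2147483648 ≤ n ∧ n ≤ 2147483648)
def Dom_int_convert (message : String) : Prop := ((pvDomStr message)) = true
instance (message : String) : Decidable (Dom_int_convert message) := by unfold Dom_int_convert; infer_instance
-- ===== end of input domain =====

-- B replaces A's 26-entry dict scan with closed-form ord arithmetic (simpler).

-- ===== PORT A =====
-- the dict literal 'stream' (insertion order)
def pvStream : List (Char × Int) :=
  [('A',1), ('B',2), ('C',3), ('D',4), ('E',5), ('F',6), ('G',7),
   ('H',8), ('I',9), ('J',10), ('K',11), ('L',12), ('M',13), ('N',14),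
   ('O',15), ('P',16), ('Q',17), ('R',18), ('S',19), ('T',20), ('U',21),
   ('V',22), ('W',23), ('X',24), ('Y',25), ('Z',26)]

def int_convert (message : String) : List Int :=
  message.toList.foldl
    (fun nums letter =>
      pvStream.foldl (fun nums kv => if letter = kv.1 then nums ++ [kv.2] else nums) nums)
    []

-- ===== PORT B =====
def int_convert_alt (message : String) : List Int :=
  message.toList.filterMap
    (fun letter => if 'A' ≤ letter ∧ letter ≤ 'Z' then some ((letter.toNat : Int) - 64) else none)

-- ===== PRECONDITION & SPEC =====
def Spec_int_convert (message : String) (out : List Int) : Prop := out = int_convert_alt message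
instance (message : String) (out : List Int) : Decidable (Spec_int_convert message out) := by unfold Spec_int_convert; infer_instance

-- ===== CLAIM (what is proved, stated in full; the proofs are below) =====
def Claim_equal_int_convert : Prop := ∀ (message : String), Dom_int_convert message → Spec_int_convert message (int_convert message)

-- ===== LEMMAS AND PROOFS =====

lemma pv_inner_from (c : Char) (l : List (Char × Int)) (nums : List Int) :
    l.foldl (fun ns kv => if c = kv.1 then ns ++ [kv.2] else ns) nums
      = nums ++ l.foldl (fun ns kv => if c = kv.1 then ns ++ [kv.2] else ns) [] := by
  induction l generalizing nums with
  | nil => simp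
  | cons kv t ih =>
    simp only [List.foldl_cons]
    split_ifs with h
    · simp only [List.nil_append]
      rw [ih (nums ++ [kv.2]), ih [kv.2]]; simp
    · rw [ih nums]

lemma pv_inner_eq (c : Char) (hd : pvDomChar c = true) :
    pvStream.foldl (fun ns kv => if c = kv.1 then ns ++ [kv.2] else ns) []
      = (if 'A' ≤ c ∧ c ≤ 'Z' then [((c.toNat : Int) - 64)] else []) := by
  have hb : 9 ≤ c.toNat ∧ c.toNat ≤ 126 := by
    simp only [pvDomChar, Bool.or_eq_true, Bool.and_eq_true, decide_eq_true_eq, beq_iff_eq] at hd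
    omega
  obtain ⟨h1, h2⟩ := hb
  rw [← Char.ofNat_toNat c]
  generalize hg : c.toNat = n at h1 h2 ⊢
  interval_cases n <;> decide

lemma pv_main (l : List Char) (acc : List Int) (hd : ∀ c ∈ l, pvDomChar c = true) :
    l.foldl
      (fun nums letter =>
        pvStream.foldl (fun nums kv => if letter = kv.1 then nums ++ [kv.2] else nums) nums)
      acc
    = acc ++ l.filterMap
        (fun letter => if 'A' ≤ letter ∧ letter ≤ 'Z' then some ((letter.toNat : Int) - 64) else none) := by
  induction l generalizing acc with
  | nil => simp
  | cons c t ih =>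
    have ht : ∀ x ∈ t, pvDomChar x = true := fun x hx => hd x (List.mem_cons_of_mem _ hx)
    simp only [List.foldl_cons, List.filterMap_cons]
    rw [pv_inner_from, pv_inner_eq c (hd c (List.mem_cons_self))]
    split_ifs with h
    · rw [ih _ ht]; simp
    · rw [ih _ ht]; simp

-- ===== VERDICT (by name: the statement is the Claim_ definition above) =====
theorem int_convert_spec : Claim_equal_int_convert := by
  intro message hd
  unfold Spec_int_convert int_convert int_convert_alt
  have hall : ∀ c ∈ message.toList, pvDomChar c = true := by
    simpa [Dom_int_convert, pvDomStr, List.all_eq_true] using hd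
  simpa using pv_main message.toList [] hall
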